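-- pv_equiv track=rewrite | github.com/kovidgoyal/calibre | src/calibre/utils/mechanize/_rfc3986.py | remove_dot_segments
-- ===== SOURCE A (Python) =====
-- def remove_dot_segments(path):
--     r = []
--     while path:
--         # A
--         if path.startswith("../"):
--             path = path[3:]
--             continue
--         if path.startswith("./"):
--             path = path[2:]
--             continue
--         # B
--         if path.startswith("/./"):
--             path = path[2:]
--             continue
--         if path == "/.":
--             path = "/"
--             continue
--         # C
--         if path.startswith("/../"):
--             path = path[3:]
--             if r:
--                 r.pop()
--             continue
--         if path == "/..":
--             path = "/"
--             if r:
--                 r.pop()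
--             continue
--         # D
--         if path == ".":
--             path = path[1:]
--             continue
--         if path == "..":
--             path = path[2:]
--             continue
--         # E
--         start = 0
--         if path.startswith("/"):
--             start = 1
--         ii = path.find("/", start)
--         if ii < 0:
--             ii = None
--         r.append(path[:ii])
--         if ii is None:
--             break
--         path = path[ii:]
--     return "".join(r)
-- ===== SOURCE B (Python) =====
-- def remove_dot_segments(path):
--     # One pass over the '/'-split components with a segment stack (no repeated tail slicing).
--     comps = path.split('/')
--     last = len(comps) - 1
--     r = []
--     rel = True  # still in the leading relative position (no slash consumed into output yet)
--     for i, seg in enumerate(comps):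
--         if rel:
--             if seg == '.' or seg == '..':
--                 continue
--             rel = False
--             if seg:
--                 r.append(seg)
--         elif seg == '.':
--             if i == last:
--                 r.append('/')
--         elif seg == '..':
--             if r:
--                 r.pop()
--             if i == last:
--                 r.append('/')
--         else:
--             r.append('/' + seg)
--     return ''.join(r)
-- ===== Notes on version B (the rewrite author's own statement) =====
-- stated objective: alternative
-- what changed: B replaces A's while-loop, which repeatedly re-slices the remaining path string and re-scans it for the next separator, with a single pass over the slash-separated components of the path maintaining a segment stack.
import Mathlib
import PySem

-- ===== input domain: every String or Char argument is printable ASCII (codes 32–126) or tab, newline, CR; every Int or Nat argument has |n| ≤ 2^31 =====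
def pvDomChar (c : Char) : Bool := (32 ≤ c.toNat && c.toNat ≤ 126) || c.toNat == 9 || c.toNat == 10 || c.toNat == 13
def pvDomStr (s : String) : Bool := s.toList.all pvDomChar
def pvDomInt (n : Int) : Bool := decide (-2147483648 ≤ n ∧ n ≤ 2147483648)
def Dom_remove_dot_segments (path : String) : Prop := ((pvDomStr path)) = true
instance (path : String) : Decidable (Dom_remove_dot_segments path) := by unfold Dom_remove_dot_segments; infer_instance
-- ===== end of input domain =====

-- B rewrites A's repeated-tail-slicing loop as one pass over path.split('/') with a segment stack.

-- first '/' at/after the start offset is at a positive index (cited by aLoop's termination proof)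
theorem pv_find_pos_abs (path : List Char) (hne : path ≠ [])
    (h : ¬ PySem.Chars.findFrom path "/".toList 1 < 0) :
    1 ≤ PySem.Chars.findFrom path "/".toList 1 := by
  have h1 : (1:Nat) ≤ path.length := by
    cases path with
    | nil => exact absurd rfl hne
    | cons c t => simp
  have hf := PySem.Chars.findFrom_natCast path "/".toList 1 h1
  rw [show ((1:Nat):Int) = 1 by norm_num] at hf
  rw [hf] at h ⊢
  have := PySem.Chars.neg_one_le_find (path.drop 1) "/".toList
  split at h
  · omega
  · split
    · omega
    · omega

theorem pv_find_pos_rel (path : List Char)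
    (hs : PySem.Chars.startswith path "/".toList = false)
    (h : ¬ PySem.Chars.find path "/".toList < 0) :
    1 ≤ PySem.Chars.find path "/".toList := by
  have hge : 0 ≤ PySem.Chars.find path "/".toList := by omega
  rcases Nat.eq_zero_or_pos (PySem.Chars.find path "/".toList).toNat with h0 | h0
  · exfalso
    have := (PySem.Chars.find_spec hge).1
    rw [h0, List.drop_zero] at this
    have h2 := (PySem.Chars.startswith_iff path "/".toList).2 this
    simp_all
  · omega

-- ===== PORT A =====
-- A's while loop over the remaining path string; r is the list of output chunks.
def aLoop (r : List (List Char)) (path : List Char) : List (List Char) :=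
  if path = [] then r                                       -- while path:
  else if PySem.Chars.startswith path "../".toList then
    aLoop r (PySem.List.slice path (some 3) none)           -- path = path[3:]
  else if PySem.Chars.startswith path "./".toList then
    aLoop r (PySem.List.slice path (some 2) none)           -- path = path[2:]
  else if PySem.Chars.startswith path "/./".toList then
    aLoop r (PySem.List.slice path (some 2) none)           -- path = path[2:]
  else if path = "/.".toList then
    aLoop r "/".toList                                      -- path = "/"
  else if PySem.Chars.startswith path "/../".toList then
    aLoop (if r = [] then r else r.dropLast)                -- if r: r.pop()
      (PySem.List.slice path (some 3) none)                 -- path = path[3:]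
  else if path = "/..".toList then
    aLoop (if r = [] then r else r.dropLast) "/".toList     -- path = "/"; if r: r.pop()
  else if path = ".".toList then
    aLoop r (PySem.List.slice path (some 1) none)           -- path = path[1:]
  else if path = "..".toList then
    aLoop r (PySem.List.slice path (some 2) none)           -- path = path[2:]
  else
    let start : Int := if PySem.Chars.startswith path "/".toList then 1 else 0
    let ii : Int := PySem.Chars.findFrom path "/".toList start
    if ii < 0 then r ++ [path]                              -- ii = None: append path[:None] and break
    else aLoop (r ++ [PySem.List.slice path none (some ii)])  -- r.append(path[:ii])
           (PySem.List.slice path (some ii) none)           -- path = path[ii:]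
termination_by path.length
decreasing_by
  · simp_all [PySem.List.slice_from (a := (3:Int)) path (by norm_num), List.length_pos_iff]
  · simp_all [PySem.List.slice_from (a := (2:Int)) path (by norm_num), List.length_pos_iff]
  · simp_all [PySem.List.slice_from (a := (2:Int)) path (by norm_num), List.length_pos_iff]
  · subst_vars; decide
  · simp_all [PySem.List.slice_from (a := (3:Int)) path (by norm_num), List.length_pos_iff]
  · subst_vars; decide
  · subst_vars; decide
  · subst_vars; decide
  · -- E branch: the first '/' is at index ii ≥ 1
    rename_i h0 h1 h2 h3 h4 h5 h6 h7 h8 hii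
    have hii' := hii
    simp only [ii, start] at hii'
    have hlen := List.length_pos_of_ne_nil h0
    by_cases hs : PySem.Chars.startswith path "/".toList = true
    · simp only [hs, reduceDIte] at hii' ⊢
      have hpos := pv_find_pos_abs path h0 hii'
      rw [PySem.List.slice_from path (by omega)]
      simp only [List.length_drop]
      omega
    · simp only [hs, Bool.false_eq_true, reduceDIte] at hii' ⊢
      rw [PySem.Chars.findFrom_zero] at hii' ⊢
      have hpos := pv_find_pos_rel path (by simpa using hs) hii'
      rw [PySem.List.slice_from path (by omega)]
      simp only [List.length_drop]
      omega

def remove_dot_segments (path : String) : String :=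
  String.ofList (PySem.Chars.join [] (aLoop [] path.toList))    -- "".join(r)

-- ===== PORT B =====
-- One pass over the components of path.split('/'); rel = still in the leading relative position.
def bLoop (rel : Bool) (r : List (List Char)) (comps : List (List Char)) : List (List Char) :=
  match comps with
  | [] => r                                                 -- ''.join at the end
  | seg :: rest =>
    if rel then
      if seg = ".".toList ∨ seg = "..".toList then bLoop true r rest
      else bLoop false (if seg = [] then r else r ++ [seg]) rest
    else if seg = ".".toList then
      if rest = [] then r ++ ["/".toList] else bLoop false r rest
    else if seg = "..".toList then
      if rest = [] then (if r = [] then r else r.dropLast) ++ ["/".toList]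
      else bLoop false (if r = [] then r else r.dropLast) rest
    else bLoop false (r ++ ['/' :: seg]) rest               -- r.append('/' + seg)

def remove_dot_segments_alt (path : String) : String :=
  String.ofList (PySem.Chars.join [] (bLoop true [] (path.toList.splitOn '/')))

-- ===== PRECONDITION & SPEC =====
def Spec_remove_dot_segments (path : String) (out : String) : Prop := out = remove_dot_segments_alt path
instance (path : String) (out : String) : Decidable (Spec_remove_dot_segments path out) := by unfold Spec_remove_dot_segments; infer_instance

-- ===== CLAIM (what is proved, stated in full; the proofs are below) =====
def Claim_equal_remove_dot_segments : Prop := ∀ (path : String), Dom_remove_dot_segments path → Spec_remove_dot_segments path (remove_dot_segments path)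

-- ===== LEMMAS AND PROOFS =====

-- splitOn '/' facts
theorem pv_split_slash (s : List Char) : ('/'::s).splitOn '/' = [] :: s.splitOn '/' := by
  simp [List.splitOn, List.splitOnP_cons]

theorem pv_split_cons {c : Char} (h : c ≠ '/') (s : List Char) :
    (c::s).splitOn '/' = ((s.splitOn '/').modifyHead (c :: ·)) := by
  simp [List.splitOn, List.splitOnP_cons, h]

theorem pv_split_ne_nil (s : List Char) : s.splitOn '/' ≠ [] := by
  induction s with
  | nil => simp [List.splitOn, List.splitOnP_nil]
  | cons c t ih =>
    by_cases hc : c = '/'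
    · subst hc; rw [pv_split_slash]; simp
    · rw [pv_split_cons hc]
      cases h : t.splitOn '/' with
      | nil => exact absurd h ih
      | cons a l => simp

theorem pv_split_noslash (s : List Char) (h : '/' ∉ s) : s.splitOn '/' = [s] := by
  induction s with
  | nil => simp [List.splitOn, List.splitOnP_nil]
  | cons c t ih =>
    have hc : c ≠ '/' := by intro hh; exact h (by simp [hh])
    rw [pv_split_cons hc, ih (by intro hm; exact h (by simp [hm]))]
    simp

theorem pv_split_decomp (pre post : List Char) (h : '/' ∉ pre) :
    (pre ++ '/'::post).splitOn '/' = pre :: post.splitOn '/' := by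
  induction pre with
  | nil => simpa using pv_split_slash post
  | cons c p ih =>
    have hc : c ≠ '/' := by intro hh; exact h (by simp [hh])
    rw [List.cons_append, pv_split_cons hc, ih (by intro hm; exact h (by simp [hm]))]
    simp

-- decomposition of a string at the first '/' found by find
theorem pv_find_decomp (s : List Char) (h : 0 ≤ PySem.Chars.find s "/".toList) :
    '/' ∉ s.take (PySem.Chars.find s "/".toList).toNat ∧
    s = s.take (PySem.Chars.find s "/".toList).toNat ++
        '/' :: s.drop ((PySem.Chars.find s "/".toList).toNat + 1) ∧
    (s.take (PySem.Chars.find s "/".toList).toNat).length =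
      (PySem.Chars.find s "/".toList).toNat := by
  obtain ⟨hpre, hmin⟩ := PySem.Chars.find_spec h
  set n := (PySem.Chars.find s "/".toList).toNat with hn
  obtain ⟨u, hu⟩ := hpre
  have hdrop : s.drop n = '/' :: u := by simpa using hu.symm
  have hlt : n < s.length := by
    by_contra hge
    rw [List.drop_eq_nil_of_le (by omega)] at hdrop
    simp at hdrop
  refine ⟨?_, ?_, by simp [List.length_take]; omega⟩
  · intro hm
    obtain ⟨i, hi, hgi⟩ := List.getElem_of_mem hm
    have hi' : i < n := by simp [List.length_take] at hi; omega
    have : s.drop i = '/' :: s.drop (i+1) := by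
      rw [List.drop_eq_getElem_cons (by omega)]
      congr 1
      rw [← hgi, List.getElem_take]
    exact hmin i hi' ⟨s.drop (i+1), by simpa using this.symm⟩
  · conv_lhs => rw [← List.take_append_drop n s]
    rw [hdrop]
    congr 2
    have : u = (s.drop n).drop 1 := by rw [hdrop]; simp
    rw [this, List.drop_drop]

-- reducing one bLoop step on a leading empty component
theorem pv_bLoop_nilseg (r : List (List Char)) (l : List (List Char)) :
    bLoop true r ([] :: l) = bLoop false r l := by
  simp [bLoop]

theorem pv_aLoop_nil (r : List (List Char)) : aLoop r [] = r := by
  rw [aLoop]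
  simp

theorem pv_aLoop_slash (r : List (List Char)) : aLoop r "/".toList = r ++ ["/".toList] := by
  rw [aLoop, if_neg (by decide), if_neg (by decide), if_neg (by decide), if_neg (by decide),
    if_neg (by decide), if_neg (by decide), if_neg (by decide), if_neg (by decide),
    if_neg (by decide), if_pos (by decide)]

theorem aLoop_eq_bLoop : ∀ (n : Nat) (path : List Char) (r : List (List Char)),
    path.length ≤ n → aLoop r path = bLoop true r (path.splitOn '/') := by
  intro n
  induction n with
  | zero =>
    intro path r hlen
    have : path = [] := by cases path <;> simp_all
    subst this
    rw [aLoop]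
    simp [bLoop, List.splitOn, List.splitOnP_nil]
  | succ n ih =>
    intro path r hlen
    by_cases hnil : path = []
    · subst hnil
      rw [aLoop]
      simp [bLoop, List.splitOn, List.splitOnP_nil]
    by_cases h1 : PySem.Chars.startswith path "../".toList = true
    · obtain ⟨t, ht⟩ := (PySem.Chars.startswith_iff path "../".toList).1 h1
      have hp : path = '.'::'.'::'/'::t := ht.symm
      subst hp
      rw [aLoop, if_neg hnil, if_pos h1,
        PySem.List.slice_from _ (by norm_num)]
      simp only [show ((3:Int)).toNat = 3 from rfl, show ((2:Int)).toNat = 2 from rfl,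
        show ((1:Int)).toNat = 1 from rfl, List.drop_succ_cons, List.drop_zero]
      have hsplit : ('.'::'.'::'/'::t).splitOn '/' = ['.','.'] :: t.splitOn '/' := by
        rw [pv_split_cons (by decide), pv_split_cons (by decide), pv_split_slash]
        rfl
      rw [hsplit, show bLoop true r (['.','.'] :: t.splitOn '/') = bLoop true r (t.splitOn '/')
        by simp [bLoop]]
      exact ih t r (by simp at hlen; omega)
    by_cases h2 : PySem.Chars.startswith path "./".toList = true
    · obtain ⟨t, ht⟩ := (PySem.Chars.startswith_iff path "./".toList).1 h2
      have hp : path = '.'::'/'::t := ht.symm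
      subst hp
      rw [aLoop, if_neg hnil, if_neg h1, if_pos h2,
        PySem.List.slice_from _ (by norm_num)]
      simp only [show ((3:Int)).toNat = 3 from rfl, show ((2:Int)).toNat = 2 from rfl,
        show ((1:Int)).toNat = 1 from rfl, List.drop_succ_cons, List.drop_zero]
      have hsplit : ('.'::'/'::t).splitOn '/' = ['.'] :: t.splitOn '/' := by
        rw [pv_split_cons (by decide), pv_split_slash]
        rfl
      rw [hsplit, show bLoop true r (['.'] :: t.splitOn '/') = bLoop true r (t.splitOn '/')
        by simp [bLoop]]
      exact ih t r (by simp at hlen; omega)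
    by_cases h3 : PySem.Chars.startswith path "/./".toList = true
    · obtain ⟨t, ht⟩ := (PySem.Chars.startswith_iff path "/./".toList).1 h3
      have hp : path = '/'::'.'::'/'::t := ht.symm
      subst hp
      rw [aLoop, if_neg hnil, if_neg h1, if_neg h2, if_pos h3,
        PySem.List.slice_from _ (by norm_num)]
      simp only [show ((3:Int)).toNat = 3 from rfl, show ((2:Int)).toNat = 2 from rfl,
        show ((1:Int)).toNat = 1 from rfl, List.drop_succ_cons, List.drop_zero]
      have hsplit : ('/'::'.'::'/'::t).splitOn '/' = [] :: ['.'] :: t.splitOn '/' := by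
        rw [pv_split_slash, pv_split_cons (by decide), pv_split_slash]
        rfl
      rw [hsplit, pv_bLoop_nilseg,
        show bLoop false r (['.'] :: t.splitOn '/') = bLoop false r (t.splitOn '/')
          by simp [bLoop, pv_split_ne_nil t]]
      rw [ih ('/'::t) r (by simp at hlen ⊢; omega), pv_split_slash, pv_bLoop_nilseg]
    by_cases h4 : path = "/.".toList
    · subst h4
      rw [aLoop, if_neg hnil, if_neg h1, if_neg h2, if_neg h3, if_pos rfl]
      rw [pv_aLoop_slash]
      simp [bLoop, show List.splitOn '/' ['/','.'] = [[], ['.']] from by decide]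
    by_cases h5 : PySem.Chars.startswith path "/../".toList = true
    · obtain ⟨t, ht⟩ := (PySem.Chars.startswith_iff path "/../".toList).1 h5
      have hp : path = '/'::'.'::'.'::'/'::t := ht.symm
      subst hp
      rw [aLoop, if_neg hnil, if_neg h1, if_neg h2, if_neg h3, if_neg h4, if_pos h5,
        PySem.List.slice_from _ (by norm_num)]
      simp only [show ((3:Int)).toNat = 3 from rfl, show ((2:Int)).toNat = 2 from rfl,
        show ((1:Int)).toNat = 1 from rfl, List.drop_succ_cons, List.drop_zero]
      have hsplit : ('/'::'.'::'.'::'/'::t).splitOn '/' = [] :: ['.','.'] :: t.splitOn '/' := by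
        rw [pv_split_slash, pv_split_cons (by decide), pv_split_cons (by decide), pv_split_slash]
        rfl
      rw [hsplit, pv_bLoop_nilseg,
        show bLoop false r (['.','.'] :: t.splitOn '/') =
            bLoop false (if r = [] then r else r.dropLast) (t.splitOn '/')
          by simp [bLoop, pv_split_ne_nil t]]
      rw [ih ('/'::t) _ (by simp at hlen ⊢; omega), pv_split_slash, pv_bLoop_nilseg]
    by_cases h6 : path = "/..".toList
    · subst h6
      rw [aLoop, if_neg hnil, if_neg h1, if_neg h2, if_neg h3, if_neg h4, if_neg h5, if_pos rfl]
      rw [pv_aLoop_slash]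
      simp [bLoop, show List.splitOn '/' ['/','.','.'] = [[], ['.','.']] from by decide]
    by_cases h7 : path = ".".toList
    · subst h7
      rw [aLoop, if_neg hnil, if_neg h1, if_neg h2, if_neg h3, if_neg h4, if_neg h5,
        if_neg h6, if_pos rfl,
        PySem.List.slice_from _ (by norm_num)]
      simp only [show ((3:Int)).toNat = 3 from rfl, show ((2:Int)).toNat = 2 from rfl,
        show ((1:Int)).toNat = 1 from rfl, List.drop_succ_cons, List.drop_zero]
      rw [show List.drop 1 ".".toList = ([] : List Char) from by decide, pv_aLoop_nil]
      simp [bLoop, show List.splitOn '/' ['.'] = [['.']] from by decide]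
    by_cases h8 : path = "..".toList
    · subst h8
      rw [aLoop, if_neg hnil, if_neg h1, if_neg h2, if_neg h3, if_neg h4, if_neg h5,
        if_neg h6, if_neg h7, if_pos rfl,
        PySem.List.slice_from _ (by norm_num)]
      simp only [show ((3:Int)).toNat = 3 from rfl, show ((2:Int)).toNat = 2 from rfl,
        show ((1:Int)).toNat = 1 from rfl, List.drop_succ_cons, List.drop_zero]
      rw [show List.drop 2 "..".toList = ([] : List Char) from by decide, pv_aLoop_nil]
      simp [bLoop, show List.splitOn '/' ['.','.'] = [['.','.']] from by decide]
    -- E branch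
    rw [aLoop, if_neg hnil, if_neg h1, if_neg h2, if_neg h3, if_neg h4, if_neg h5,
      if_neg h6, if_neg h7, if_neg h8]
    by_cases hs : PySem.Chars.startswith path "/".toList = true
    · obtain ⟨t, ht⟩ := (PySem.Chars.startswith_iff path "/".toList).1 hs
      have hp : path = '/'::t := ht.symm
      subst hp
      simp only [hs, reduceIte, reduceDIte]
      have hf := PySem.Chars.findFrom_natCast ('/'::t) "/".toList 1 (by simp)
      rw [show ((1:Nat):Int) = 1 from by norm_num] at hf
      rw [hf]
      have hd1 : ('/'::t).drop 1 = t := by simp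
      rw [hd1] at *
      rcases lt_or_ge (PySem.Chars.find t "/".toList) 0 with hm | hm
      · -- no further '/': append the whole path and stop
        have hm1 : PySem.Chars.find t "/".toList = -1 := by
          have := PySem.Chars.neg_one_le_find t "/".toList
          omega
        rw [if_pos hm1, if_pos (by norm_num)]
        have hns : '/' ∉ t := by
          have := (PySem.Chars.find_eq_neg_one_iff t "/".toList).1 hm1
          intro hmem
          exact this ((List.singleton_infix_iff '/' t).2 hmem)
        rw [pv_split_slash, pv_split_noslash t hns, pv_bLoop_nilseg]
        have ht1 : t ≠ ['.'] := by intro hh; exact h4 (by rw [hh]; rfl)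
        have ht2 : t ≠ ['.','.'] := by intro hh; exact h6 (by rw [hh]; rfl)
        simp [bLoop, ht1, ht2]
      · -- '/' inside t at index m
        obtain ⟨hpre, hdec, hlenpre⟩ := pv_find_decomp t hm
        set m := (PySem.Chars.find t "/".toList).toNat with hmdef
        set pre := t.take m with hpredef
        set post := t.drop (m+1) with hpostdef
        rw [if_neg (by omega), if_neg (by omega)]
        have hii : (1 + PySem.Chars.find t "/".toList).toNat = 1 + m := by omega
        rw [PySem.List.slice_to _ (by omega), PySem.List.slice_from _ (by omega), hii]
        have htake : ('/'::t).take (1+m) = '/' :: pre := by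
          simp [List.take_cons, hpredef]
        have hdropm : t.drop m = '/' :: post := by
          conv_lhs => rw [hdec]
          rw [List.drop_append_of_le_length (by omega), ← hlenpre, List.drop_length]
          rfl
        have hdrop : ('/'::t).drop (1+m) = '/' :: post := by
          rw [Nat.add_comm, List.drop_succ_cons]
          exact hdropm
        rw [htake, hdrop]
        have hsplit : ('/'::t).splitOn '/' = [] :: pre :: post.splitOn '/' := by
          rw [pv_split_slash]
          conv_lhs => rw [hdec]
          rw [pv_split_decomp pre post hpre]
        rw [hsplit, pv_bLoop_nilseg]
        have hp1 : pre ≠ ['.'] := by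
          intro hh
          exact (by simpa using h3 : ¬ PySem.Chars.startswith ('/'::t) ['/','.','/'] = true)
            ((PySem.Chars.startswith_iff _ _).2 ⟨post, by rw [hdec, hh]; rfl⟩)
        have hp2 : pre ≠ ['.','.'] := by
          intro hh
          exact (by simpa using h5 : ¬ PySem.Chars.startswith ('/'::t) ['/','.','.','/'] = true)
            ((PySem.Chars.startswith_iff _ _).2 ⟨post, by rw [hdec, hh]; rfl⟩)
        rw [show bLoop false r (pre :: post.splitOn '/') =
            bLoop false (r ++ ['/' :: pre]) (post.splitOn '/')
          from by simp [bLoop, hp1, hp2, pv_split_ne_nil post]]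
        rw [ih ('/'::post) _ (by
          have : t.length = m + 1 + post.length := by
            conv_lhs => rw [hdec]
            simp [hlenpre]
            omega
          simp at hlen ⊢
          omega), pv_split_slash, pv_bLoop_nilseg]
    · simp only [hs, Bool.false_eq_true, reduceIte, reduceDIte]
      rw [PySem.Chars.findFrom_zero]
      rcases lt_or_ge (PySem.Chars.find path "/".toList) 0 with hm | hm
      · rw [if_pos (by omega)]
        have hm1 : PySem.Chars.find path "/".toList = -1 := by
          have := PySem.Chars.neg_one_le_find path "/".toList
          omega
        have hns : '/' ∉ path := by
          have := (PySem.Chars.find_eq_neg_one_iff path "/".toList).1 hm1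
          intro hmem
          exact this ((List.singleton_infix_iff '/' path).2 hmem)
        rw [pv_split_noslash path hns]
        have ht1 : path ≠ ['.'] := by intro hh; exact h7 (by rw [hh]; rfl)
        have ht2 : path ≠ ['.','.'] := by intro hh; exact h8 (by rw [hh]; rfl)
        simp [bLoop, ht1, ht2, hnil]
      · obtain ⟨hpre, hdec, hlenpre⟩ := pv_find_decomp path hm
        set m := (PySem.Chars.find path "/".toList).toNat with hmdef
        set pre := path.take m with hpredef
        set post := path.drop (m+1) with hpostdef
        rw [if_neg (by omega)]
        rw [PySem.List.slice_to _ (by omega), PySem.List.slice_from _ (by omega)]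
        have hdropm : path.drop m = '/' :: post := by
          conv_lhs => rw [hdec]
          rw [List.drop_append_of_le_length (by omega), ← hlenpre, List.drop_length]
          rfl
        rw [hdropm]
        have hsplit : path.splitOn '/' = pre :: post.splitOn '/' := by
          conv_lhs => rw [hdec]
          rw [pv_split_decomp pre post hpre]
        rw [hsplit]
        have hm1 : 1 ≤ PySem.Chars.find path "/".toList :=
          pv_find_pos_rel path (by simpa using hs) (by omega)
        have hp0 : pre ≠ [] := by
          intro hh
          rw [hh] at hlenpre
          simp at hlenpre
          omega
        have hp1 : pre ≠ ['.'] := by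
          intro hh
          exact (by simpa using h2 : ¬ PySem.Chars.startswith path ['.','/'] = true)
            ((PySem.Chars.startswith_iff _ _).2 ⟨post, by rw [hdec, hh]; rfl⟩)
        have hp2 : pre ≠ ['.','.'] := by
          intro hh
          exact (by simpa using h1 : ¬ PySem.Chars.startswith path ['.','.','/'] = true)
            ((PySem.Chars.startswith_iff _ _).2 ⟨post, by rw [hdec, hh]; rfl⟩)
        rw [show bLoop true r (pre :: post.splitOn '/') =
            bLoop false (r ++ [pre]) (post.splitOn '/')
          from by simp [bLoop, hp0, hp1, hp2]]
        rw [ih ('/'::post) _ (by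
          have : path.length = m + 1 + post.length := by
            conv_lhs => rw [hdec]
            simp [hlenpre]
            omega
          simp at ⊢
          omega), pv_split_slash, pv_bLoop_nilseg]


-- ===== VERDICT (by name: the statement is the Claim_ definition above) =====
theorem remove_dot_segments_spec : Claim_equal_remove_dot_segments := by
  intro path _
  unfold Spec_remove_dot_segments remove_dot_segments remove_dot_segments_alt
  rw [aLoop_eq_bLoop path.toList.length path.toList [] le_rfl]
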